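-- pv_equiv track=rewrite | github.com/EnmmmmOvO/Computer-Science-Engineering | COMP2041/ass2/sheepy.py | word_list_process
-- ===== SOURCE A (Python) =====
-- def word_list_process(word_list):
--     word_list = word_list[:-1]
--     if len(word_list) == 0:
--         return ''
--     if len(word_list) == 1 and word_list[0][1] == 0:
--         return word_list[0][0]
--
--     out = ''
--     status = 0
--     for i, j in word_list:
--         if j == -2:
--             out += i
--             break
--         elif j == 0:
--             status = 1
--             out += '{' + i + '}'
--         elif j == 1:
--             out += i
--
--     return "'" + out + "'" if status == 0 else f"f'{out}'"
-- ===== SOURCE B (Python) =====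
-- def word_list_process(word_list):
--     items = word_list[:-1]
--     if not items:
--         return ''
--     if len(items) == 1 and items[0][1] == 0:
--         return items[0][0]
--     # build right-to-left: prepend each rendered word; a -2 marker discards
--     # everything accumulated to its right (so the leftmost -2, processed last, wins)
--     text, f = '', False
--     for w, t in reversed(items):
--         if t == -2:
--             text, f = w, False
--         elif t == 0:
--             text, f = '{' + w + '}' + text, True
--         elif t == 1:
--             text = w + text
--     return f"f'{text}'" if f else "'" + text + "'"
-- ===== Notes on version B (the rewrite author's own statement) =====
-- stated objective: alternative
-- what changed: Replaces A's left-to-right accumulator loop (out += with a mutable status flag and break at the first -2) by a single right-to-left pass that prepends each rendered word and resets the accumulated pair on a -2 marker, so the leftmost -2 (processed last) naturally wins without a break.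
import Mathlib
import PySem

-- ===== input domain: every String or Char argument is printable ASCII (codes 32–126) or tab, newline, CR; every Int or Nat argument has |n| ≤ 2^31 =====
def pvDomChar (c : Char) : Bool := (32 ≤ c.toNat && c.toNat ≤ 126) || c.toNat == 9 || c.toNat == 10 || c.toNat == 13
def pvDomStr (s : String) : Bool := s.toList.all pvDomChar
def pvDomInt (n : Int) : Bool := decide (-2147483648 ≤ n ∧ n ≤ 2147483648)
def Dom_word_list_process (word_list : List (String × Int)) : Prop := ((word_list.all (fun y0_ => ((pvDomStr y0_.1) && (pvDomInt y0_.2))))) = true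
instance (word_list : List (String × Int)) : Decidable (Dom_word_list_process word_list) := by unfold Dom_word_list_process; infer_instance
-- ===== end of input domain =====

-- B replaces A's left-to-right accumulator loop (status flag + break) by a single
-- right-to-left pass that prepends each rendered word and resets on a -2 marker
-- (objective: alternative; same cost).

-- ===== PORT A =====
-- A's for-loop with `out`, `status` and `break`: recursion over the list carrying
-- the same accumulator state; the `break` ends the recursion.
def pvLoopA : List (String × Int) → String → Int → String × Int
  | [], out, status => (out, status)
  | (i, j) :: rest, out, status =>
    if j = -2 then (out ++ i, status)
    else if j = 0 then pvLoopA rest (out ++ "{" ++ i ++ "}") 1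
    else if j = 1 then pvLoopA rest (out ++ i) status
    else pvLoopA rest out status

def word_list_process (word_list : List (String × Int)) : String :=
  let wl := PySem.List.slice word_list none (some (-1))   -- word_list[:-1]
  if wl.length = 0 then ""
  else if wl.length = 1 ∧ (wl.headD ("", 0)).2 = 0 then (wl.headD ("", 0)).1
  else
    let r := pvLoopA wl "" 0
    if r.2 = 0 then "'" ++ r.1 ++ "'" else "f'" ++ r.1 ++ "'"

-- ===== PORT B =====
-- Source B's right-to-left loop body: state (text, f); -2 resets, 0 prepends {w} and
-- sets the flag, 1 prepends w, anything else is skipped.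
def pvStepB (acc : String × Bool) (p : String × Int) : String × Bool :=
  if p.2 = -2 then (p.1, false)
  else if p.2 = 0 then ("{" ++ p.1 ++ "}" ++ acc.1, true)
  else if p.2 = 1 then (p.1 ++ acc.1, acc.2)
  else acc

-- `for w, t in reversed(items)` = fold over items.reverse
def pvRenderIter (l : List (String × Int)) : String × Bool :=
  l.reverse.foldl pvStepB ("", false)

def word_list_process_alt (word_list : List (String × Int)) : String :=
  let items := PySem.List.slice word_list none (some (-1))   -- word_list[:-1]
  if items.length = 0 then ""
  else if items.length = 1 ∧ (items.headD ("", 0)).2 = 0 then (items.headD ("", 0)).1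
  else
    let r := pvRenderIter items
    if r.2 then "f'" ++ r.1 ++ "'" else "'" ++ r.1 ++ "'"

-- ===== PRECONDITION & SPEC =====
def Spec_word_list_process (word_list : List (String × Int)) (out : String) : Prop := out = word_list_process_alt word_list
instance (word_list : List (String × Int)) (out : String) : Decidable (Spec_word_list_process word_list out) := by unfold Spec_word_list_process; infer_instance

-- ===== CLAIM =====
def Claim_equal_word_list_process : Prop := ∀ (word_list : List (String × Int)), Dom_word_list_process word_list → Spec_word_list_process word_list (word_list_process word_list)

-- ===== LEMMAS AND PROOFS =====
-- proof helper: pvRenderIter as a structural (right) recursion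
def pvRender : List (String × Int) → String × Bool
  | [] => ("", false)
  | (w, t) :: rest =>
    if t = -2 then (w, false)
    else
      let r := pvRender rest
      if t = 0 then ("{" ++ w ++ "}" ++ r.1, true)
      else if t = 1 then (w ++ r.1, r.2)
      else (r.1, r.2)

theorem pvRenderIter_eq (l : List (String × Int)) : pvRenderIter l = pvRender l := by
  induction l with
  | nil => rfl
  | cons hd rest ih =>
    obtain ⟨w, t⟩ := hd
    have : pvRenderIter ((w, t) :: rest) = pvStepB (pvRenderIter rest) (w, t) := by
      simp [pvRenderIter, List.reverse_cons, List.foldl_append]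
    rw [this, ih]
    by_cases h2 : t = -2
    · simp [pvStepB, pvRender, h2]
    · by_cases h0 : t = 0
      · simp [pvStepB, pvRender, h0]
      · by_cases h1 : t = 1
        · simp [pvStepB, pvRender, h1]
        · simp [pvStepB, pvRender, h1, h2, h0]

theorem pvLoopA_eq (l : List (String × Int)) :
    ∀ (out : String) (s : Int),
      pvLoopA l out s = (out ++ (pvRender l).1, if (pvRender l).2 then 1 else s) := by
  induction l with
  | nil => intro out s; simp [pvLoopA, pvRender]
  | cons hd rest ih =>
    intro out s
    obtain ⟨i, j⟩ := hd
    by_cases h2 : j = -2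
    · subst h2; simp [pvLoopA, pvRender]
    · by_cases h0 : j = 0
      · subst h0
        simp only [pvLoopA, if_neg (by decide : (0 : Int) ≠ -2)]
        rw [ih]
        simp [pvRender, String.append_assoc]
      · by_cases h1 : j = 1
        · subst h1
          simp only [pvLoopA, if_neg (by decide : (1 : Int) ≠ -2),
            if_neg (by decide : (1 : Int) ≠ 0)]
          rw [ih]
          simp [pvRender, String.append_assoc]
        · simp only [pvLoopA, if_neg h2, if_neg h0, if_neg h1]
          rw [ih]
          simp [pvRender, h2, h0, h1]

-- ===== VERDICT =====
theorem word_list_process_spec : Claim_equal_word_list_process := by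
  intro word_list _
  unfold Spec_word_list_process word_list_process word_list_process_alt
  set wl := PySem.List.slice word_list none (some (-1)) with hwl
  by_cases hz : wl.length = 0
  · simp only [if_pos hz]
  · by_cases hg : wl.length = 1 ∧ (wl.headD ("", 0)).2 = 0
    · simp only [if_neg hz, if_pos hg]
    · simp only [if_neg hz, if_neg hg]
      rw [pvLoopA_eq, pvRenderIter_eq]
      rcases (pvRender wl).2 with _ | _
      · simp
      · simp
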